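-- pv_equiv track=rewrite | github.com/Percy08-dev/wordle_solver | src/choise.py | get_next_word_bi_gram
-- ===== SOURCE A (Python) =====
-- def get_next_word_bi_gram(word_list):
--     # cut bi gram
--     def bi_gram_cnt(word_list):
--         bi_grams = dict()
--         for word in word_list:
--             for i in range(0, 4):
--                 bg = word[i:i+2]
--                 if bg in bi_grams:
--                     bi_grams[bg] += 1
--                 else:
--                     bi_grams[bg] = 1
--
--         bi_grams = list(bi_grams.items())
--         bi_grams.sort(key=lambda x:x[1], reverse=True)
--
--         return [i[0] for i in bi_grams[:5]]
--
--     def get_bi_gram(word):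
--         res = [word[i:i+2] for i in range(len(word)-1)]
--         return res
--
--     def ranking(word_list, bi_gram):
--         bi_gram = set(bi_gram)
--
--         res = [(i, len(bi_gram & set(get_bi_gram(i)))) for i in word_list]
--         res.sort(key=lambda x:x[1], reverse=True)
--
--         return res
--
--     bi_gram = bi_gram_cnt(word_list)
--
--     for i in reversed(range(5)):
--         rate = ranking(word_list, bi_gram[:i+1])
--
--         if rate[0][1] == i+1:
--             return rate[0]
-- ===== SOURCE B (Python) =====
-- def get_next_word_bi_gram(word_list):
--     # count bigram slices exactly as the task defines them (word[i:i+2] for i in 0..3)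
--     counts = {}
--     for word in word_list:
--         for i in range(4):
--             bg = word[i:i+2]
--             counts[bg] = counts.get(bg, 0) + 1
--     top = [bg for bg, _ in sorted(counts.items(), key=lambda x: x[1], reverse=True)[:5]]
--
--     # single pass: each word's score is how many LEADING top bigrams it contains
--     # consecutively; keep the first word attaining the running maximum
--     best = None  # (word, score) with score > 0, or None
--     for word in word_list:
--         bgs = {word[i:i+2] for i in range(len(word) - 1)}
--         k = 0
--         for bg in top:
--             if bg in bgs:
--                 k += 1
--             else:
--                 break
--         if k > (best[1] if best is not None else 0):
--             best = (word, k)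
--     return best
-- ===== Notes on version B (the rewrite author's own statement) =====
-- stated objective: faster
-- what changed: A re-ranks the whole word list five times (one stable sort of all (word, score) pairs per candidate prefix of the top-5 bigrams, scanning levels 5..1); B computes the top-bigram list once, then makes a single pass over the words, scoring each word by how many leading top bigrams it contains consecutively and keeping the first word attaining the running maximum, so all ranking sorts disappear.
-- crash fix: On the empty word list A raises IndexError (rate[0] of the empty ranking); B returns None. — e.g. on get_next_word_bi_gram([]): A raises IndexError, B returns none
import Mathlib
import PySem

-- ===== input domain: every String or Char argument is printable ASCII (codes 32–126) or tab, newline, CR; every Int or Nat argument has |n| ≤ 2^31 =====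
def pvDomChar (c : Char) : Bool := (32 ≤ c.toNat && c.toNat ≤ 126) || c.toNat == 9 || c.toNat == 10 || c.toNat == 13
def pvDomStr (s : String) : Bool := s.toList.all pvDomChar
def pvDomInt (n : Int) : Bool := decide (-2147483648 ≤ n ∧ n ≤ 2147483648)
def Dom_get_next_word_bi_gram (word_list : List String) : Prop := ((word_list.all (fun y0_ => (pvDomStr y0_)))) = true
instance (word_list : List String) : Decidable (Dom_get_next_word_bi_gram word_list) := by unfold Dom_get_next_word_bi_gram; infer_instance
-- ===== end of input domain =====

-- B replaces A's five sort-the-whole-list ranking rounds by one pass that scores each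
-- word with its consecutive-prefix coverage of the top bigrams and keeps the first
-- running maximum (objective: faster, measured; A raises IndexError on [], excluded by Pre_).

-- ===== PORT A =====
def pvA_count (word_list : List String) : PySem.Dict String Int :=
  word_list.foldl (fun d word =>
    (PySem.List.pyRange 0 4).foldl (fun d i =>
      let bg := PySem.Str.slice word (some i) (some (i + 2))
      if d.contains bg then d.modify bg 0 (· + 1) else d.insert bg 1) d) PySem.Dict.empty

def pvA_bi_gram_cnt (word_list : List String) : List String :=
  (PySem.List.slice (PySem.List.sorted (pvA_count word_list).items (fun x => x.2) true)
    none (some 5)).map (fun i => i.1)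

def pvA_get_bi_gram (word : String) : List String :=
  (PySem.List.pyRange 0 (PySem.Str.len word - 1)).map
    (fun i => PySem.Str.slice word (some i) (some (i + 2)))

def pvA_ranking (word_list : List String) (bi_gram : List String) : List (String × Int) :=
  let bg : PySem.Set String := PySem.Set.ofList bi_gram
  let res := word_list.map (fun w =>
    (w, PySem.Set.len (PySem.Set.inter bg (PySem.Set.ofList (pvA_get_bi_gram w)))))
  PySem.List.sorted res (fun x => x.2) true

def pvA_loop (word_list : List String) (bi_gram : List String) : List Int → Option (String × Int)
  | [] => none
  | i :: rest =>
    let rate := pvA_ranking word_list (PySem.List.slice bi_gram none (some (i + 1)))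
    match rate.head? with
    | none => none   -- rate[0] raises IndexError (only for word_list = []); excluded by Pre_
    | some h => if h.2 == i + 1 then some h else pvA_loop word_list bi_gram rest

def get_next_word_bi_gram (word_list : List String) : Option (String × Int) :=
  pvA_loop word_list (pvA_bi_gram_cnt word_list) ((PySem.List.pyRange 0 5).reverse)

-- ===== PORT B =====
def pvB_top (word_list : List String) : List String :=
  let counts : PySem.Dict String Int := word_list.foldl (fun d word =>
    (PySem.List.pyRange 0 4).foldl (fun d i =>
      let bg := PySem.Str.slice word (some i) (some (i + 2))
      d.insert bg (d.getD bg 0 + 1)) d) PySem.Dict.empty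
  (PySem.List.slice (PySem.List.sorted counts.items (fun x => x.2) true)
    none (some 5)).map (fun p => p.1)

def pvB_bigrams (word : String) : PySem.Set String :=
  PySem.Set.ofList ((PySem.List.pyRange 0 (PySem.Str.len word - 1)).map
    (fun i => PySem.Str.slice word (some i) (some (i + 2))))

def pvB_cov (bgs : PySem.Set String) : List String → Int
  | [] => 0
  | bg :: rest => if PySem.Set.contains bgs bg then 1 + pvB_cov bgs rest else 0

def pvB_step (top : List String) (best : Option (String × Int)) (word : String) :
    Option (String × Int) :=
  let k := pvB_cov (pvB_bigrams word) top
  if (match best with | some p => p.2 | none => 0) < k then some (word, k) else best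

def get_next_word_bi_gram_alt (word_list : List String) : Option (String × Int) :=
  let top := pvB_top word_list
  word_list.foldl (pvB_step top) none

-- ===== PRECONDITION & SPEC =====
-- Pre_ excludes only the empty list, on which A raises IndexError (rate[0] of an empty ranking).
def Pre_get_next_word_bi_gram (word_list : List String) : Prop := word_list ≠ []
instance (word_list : List String) : Decidable (Pre_get_next_word_bi_gram word_list) := by
  unfold Pre_get_next_word_bi_gram; infer_instance
def pvWitness_get_next_word_bi_gram : List String := ["hello"]

-- On the empty list A raises IndexError; B returns None.
def Raises_get_next_word_bi_gram (word_list : List String) : Prop := word_list = []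
instance (word_list : List String) : Decidable (Raises_get_next_word_bi_gram word_list) := by
  unfold Raises_get_next_word_bi_gram; infer_instance
def pvRaiseWitness_get_next_word_bi_gram : List String := []
def pvRaiseWitnessOut_get_next_word_bi_gram : Option (String × Int) := none

def Spec_get_next_word_bi_gram (word_list : List String) (out : Option (String × Int)) : Prop :=
  out = get_next_word_bi_gram_alt word_list
instance (word_list : List String) (out : Option (String × Int)) :
    Decidable (Spec_get_next_word_bi_gram word_list out) := by
  unfold Spec_get_next_word_bi_gram; infer_instance

-- ===== CLAIM (what is proved, stated in full; the proofs are below) =====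
def Claim_equal_get_next_word_bi_gram : Prop := ∀ (word_list : List String), Dom_get_next_word_bi_gram word_list → Pre_get_next_word_bi_gram word_list → Spec_get_next_word_bi_gram word_list (get_next_word_bi_gram word_list)
def Claim_raises_get_next_word_bi_gram : Prop := (∀ (word_list : List String), Dom_get_next_word_bi_gram word_list → Raises_get_next_word_bi_gram word_list → ¬ Pre_get_next_word_bi_gram word_list) ∧ (Dom_get_next_word_bi_gram (pvRaiseWitness_get_next_word_bi_gram) ∧ Raises_get_next_word_bi_gram (pvRaiseWitness_get_next_word_bi_gram) ∧ get_next_word_bi_gram_alt (pvRaiseWitness_get_next_word_bi_gram) = pvRaiseWitnessOut_get_next_word_bi_gram)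

-- ===== LEMMAS AND PROOFS =====
lemma pv_step_eq (d : PySem.Dict String Int) (bg : String) :
    (if d.contains bg then d.modify bg 0 (· + 1) else d.insert bg 1) =
      d.insert bg (d.getD bg 0 + 1) := by
  by_cases h : d.contains bg = true
  · simp [h, PySem.Dict.modify]
  · have hb : d.contains bg = false := by simpa using h
    have hf : d.items.find? (fun p => p.1 == bg) = none := by
      rw [List.find?_eq_none]
      intro a ha
      exact List.any_eq_false.mp (show d.items.any (fun p => p.1 == bg) = false from hb) a ha
    have hg : d.getD bg 0 = 0 := by simp [PySem.Dict.getD, PySem.Dict.get?, hf]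
    simp [h, hg]

lemma pv_count_eq (wl : List String) :
    pvA_count wl = wl.foldl (fun d word =>
      (PySem.List.pyRange 0 4).foldl (fun d i =>
        let bg := PySem.Str.slice word (some i) (some (i + 2))
        d.insert bg (d.getD bg 0 + 1)) d) PySem.Dict.empty := by
  unfold pvA_count
  congr 1
  funext d word
  congr 1
  funext d i
  exact pv_step_eq d _

lemma pv_keys_nodup (wl : List String) :
    (wl.foldl (fun d word =>
      (PySem.List.pyRange 0 4).foldl (fun d i =>
        let bg := PySem.Str.slice word (some i) (some (i + 2))
        d.insert bg (d.getD bg 0 + 1)) d) (PySem.Dict.empty (κ := String) (ν := Int))).keys.Nodup := by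
  have main : ∀ (l : List String) (d : PySem.Dict String Int), d.keys.Nodup →
      (l.foldl (fun d word =>
        (PySem.List.pyRange 0 4).foldl (fun d i =>
          let bg := PySem.Str.slice word (some i) (some (i + 2))
          d.insert bg (d.getD bg 0 + 1)) d) d).keys.Nodup := by
    intro l
    induction l with
    | nil => intro d hd; simpa using hd
    | cons w t ih =>
        intro d hd
        simp only [List.foldl_cons]
        exact ih _ (PySem.Dict.nodup_keys_foldl_insert_key _ _ _ _ hd)
  exact main wl PySem.Dict.empty (by simp [PySem.Dict.empty, PySem.Dict.keys])


lemma pv_head_foldl_insertBy {α κ : Type} [LinearOrder κ] (key : α → κ) :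
    ∀ (l acc : List α) (m : α), acc.head? = some m →
      (l.foldl (fun acc x => PySem.List.insertBy (fun a b => decide (key b < key a)) x acc) acc).head? =
        some (l.foldl (fun m y => if key m < key y then y else m) m) := by
  intro l
  induction l with
  | nil => intro acc m hm; simpa using hm
  | cons x t ih =>
      intro acc m hm
      cases acc with
      | nil => simp at hm
      | cons h tl =>
          have hm' : h = m := by simpa using hm
          subst hm'
          have hhead : (PySem.List.insertBy (fun a b => decide (key b < key a)) x (h :: tl)).head? =
              some (if key h < key x then x else h) := by
            simp only [PySem.List.insertBy]
            by_cases hc : key h < key x <;> simp [hc]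
          simp only [List.foldl_cons]
          exact ih _ _ hhead

lemma pv_sorted_head {α κ : Type} [LinearOrder κ] (key : α → κ) (x : α) (t : List α) :
    (PySem.List.sorted (x :: t) key true).head? =
      some (t.foldl (fun m y => if key m < key y then y else m) x) := by
  show ((x :: t).foldl (fun acc x => PySem.List.insertBy (fun a b => decide (key b < key a)) x acc) []).head? = _
  simp only [List.foldl_cons]
  exact pv_head_foldl_insertBy key t (PySem.List.insertBy _ x []) x (by simp [PySem.List.insertBy])

lemma pv_pick_spec {α : Type} (key : α → Int) :
    ∀ (t : List α) (x : α),
    (∀ y ∈ x :: t, key y ≤ key (t.foldl (fun m y => if key m < key y then y else m) x)) ∧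
    (x :: t).find? (fun y => decide (key (t.foldl (fun m y => if key m < key y then y else m) x) ≤ key y)) =
      some (t.foldl (fun m y => if key m < key y then y else m) x) := by
  intro t
  induction t with
  | nil =>
      intro x
      refine ⟨by simp, ?_⟩
      simp [List.find?_cons_of_pos]
  | cons y t ih =>
      intro x
      by_cases hxy : key x < key y
      · have h := ih y
        simp only [List.foldl_cons, if_pos hxy]
        refine ⟨?_, ?_⟩
        · intro z hz
          rcases List.mem_cons.mp hz with rfl | hz
          · exact le_trans (le_of_lt hxy) (h.1 y (by simp))
          · exact h.1 z hz
        · rw [List.find?_cons_of_neg, h.2]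
          simp only [decide_eq_true_eq, not_le]
          exact lt_of_lt_of_le hxy (h.1 y (by simp))
      · have h := ih x
        simp only [List.foldl_cons, if_neg hxy]
        set m := t.foldl (fun m y => if key m < key y then y else m) x with hmdef
        refine ⟨?_, ?_⟩
        · intro z hz
          rcases List.mem_cons.mp hz with rfl | hz
          · exact h.1 z (by simp)
          · rcases List.mem_cons.mp hz with rfl | hz
            · exact le_trans (le_of_not_gt hxy) (h.1 x (by simp))
            · exact h.1 z (by simp [hz])
        · by_cases hpx : key m ≤ key x
          · have hfx : (x :: t).find? (fun y => decide (key m ≤ key y)) = some x := by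
              rw [List.find?_cons_of_pos]; simpa using hpx
            have hx : x = m := by
              have := h.2
              rw [hfx] at this
              exact Option.some.inj this
            rw [List.find?_cons_of_pos]
            · exact congrArg some hx
            · simpa using hpx
          · have hym : key y < key m :=
              lt_of_le_of_lt (le_of_not_gt hxy) (lt_of_not_ge hpx)
            rw [List.find?_cons_of_neg, List.find?_cons_of_neg]
            · have := h.2
              rwa [List.find?_cons_of_neg] at this
              simpa using hpx
            · simp only [decide_eq_true_eq]; exact not_le_of_gt hym
            · simpa using hpx

lemma pv_find_congr {α : Type} (p q : α → Bool) :
    ∀ (l : List α), (∀ a ∈ l, p a = q a) → l.find? p = l.find? q := by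
  intro l
  induction l with
  | nil => intro _; rfl
  | cons x t ih =>
      intro h
      have hx := h x (by simp)
      cases hq : q x
      · rw [List.find?_cons_of_neg (by simp [hx, hq]), List.find?_cons_of_neg (by simp [hq]),
          ih (fun a ha => h a (by simp [ha]))]
      · rw [List.find?_cons_of_pos (by simp [hx, hq]), List.find?_cons_of_pos (by simp [hq])]

lemma pv_pair_fold {α : Type} (key : α → Int) :
    ∀ (t : List α) (x : α),
      t.foldl (fun m y => if m.2 < key y then (y, key y) else m) (x, key x) =
        (t.foldl (fun m y => if key m < key y then y else m) x,
         key (t.foldl (fun m y => if key m < key y then y else m) x)) := by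
  intro t
  induction t with
  | nil => intro x; rfl
  | cons y t ih =>
      intro x
      simp only [List.foldl_cons]
      by_cases h : key x < key y <;> simp [h, ih]

lemma pv_foldl_max_le : ∀ (l : List Int) (a B : Int), a ≤ B → (∀ y ∈ l, y ≤ B) →
    l.foldl max a ≤ B := by
  intro l
  induction l with
  | nil => intro a B ha _; simpa using ha
  | cons x t ih =>
      intro a B ha hl
      simp only [List.foldl_cons]
      exact ih _ _ (max_le ha (hl x (by simp))) (fun y hy => hl y (by simp [hy]))

-- proof-side abbreviations
def pvCnt (T' : List String) (w : String) : Int :=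
  PySem.Set.len (PySem.Set.inter (PySem.Set.ofList T') (PySem.Set.ofList (pvA_get_bi_gram w)))
def pvCov (top : List String) (w : String) : Int := pvB_cov (pvB_bigrams w) top
def pvM (word_list top : List String) : Int :=
  word_list.foldl (fun m w => max m (pvCov top w)) 0
def pvMid (word_list top : List String) : Option (String × Int) :=
  if pvM word_list top = 0 then none
  else (word_list.find? (fun w => decide (pvM word_list top ≤ pvCov top w))).map
    (fun w => (w, pvM word_list top))
def pvAccVal (acc : Option (String × Int)) : Int := match acc with | some p => p.2 | none => 0
def pvDesc (n : Nat) : List Int := (PySem.List.pyRange 0 (n : Int)).reverse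

lemma pv_top_eq (wl : List String) : pvA_bi_gram_cnt wl = pvB_top wl := by
  unfold pvA_bi_gram_cnt
  rw [pv_count_eq]
  rfl

lemma pv_cov_eq (S : PySem.Set String) (T' : List String) :
    pvB_cov S T' = ((T'.takeWhile (fun bg => PySem.Set.contains S bg)).length : Int) := by
  induction T' with
  | nil => rfl
  | cons x t ih =>
      simp only [pvB_cov, List.takeWhile]
      cases h : PySem.Set.contains S x <;> simp [h, ih] <;> omega

lemma pv_cnt_eq (T' : List String) (h : T'.Nodup) (w : String) :
    pvCnt T' w = ((T'.filter (fun bg => PySem.Set.contains (pvB_bigrams w) bg)).length : Int) := by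
  unfold pvCnt
  rw [PySem.Set.ofList_eq_self_of_nodup T' h]
  rfl

lemma pv_filter_take_le {σ : Type} (T : List σ) (P : σ → Bool) (j : Nat) :
    ((T.take j).filter P).length ≤ j :=
  le_trans (List.length_filter_le _ _) (by simpa using List.length_take_le j T)

lemma pv_filter_take_iff {σ : Type} (T : List σ) (P : σ → Bool) (j : Nat) :
    ((T.take j).filter P).length = j ↔ j ≤ (T.takeWhile P).length := by
  induction T generalizing j with
  | nil => cases j <;> simp
  | cons x t ih =>
      cases j with
      | zero => simp
      | succ j =>
          cases h : P x
          · have h1 : (((x :: t).take (j+1)).filter P).length ≤ j := by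
              simpa [List.take, h] using le_trans (List.length_filter_le _ _)
                (by simpa using List.length_take_le j t)
            constructor
            · intro he; omega
            · intro he; simp [List.takeWhile, h] at he
          · simp [List.take, List.takeWhile, h, ih j]

lemma pv_mfold_eq (top : List String) (l : List String) (a : Int) :
    l.foldl (fun m w => max m (pvCov top w)) a = (l.map (pvCov top)).foldl max a := by
  rw [List.foldl_map]

lemma pv_le_mfold (top : List String) (l : List String) (a : Int) :
    a ≤ l.foldl (fun m w => max m (pvCov top w)) a := by
  rw [pv_mfold_eq]
  exact (PySem.List.le_foldl_max _ _).1

lemma pv_mem_le_mfold (top : List String) (l : List String) (a : Int) (w : String) (hw : w ∈ l) :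
    pvCov top w ≤ l.foldl (fun m w => max m (pvCov top w)) a := by
  rw [pv_mfold_eq]
  exact (PySem.List.le_foldl_max _ _).2 _ (List.mem_map_of_mem hw)

lemma pv_mfold_attained (top : List String) (l : List String) (a : Int) :
    l.foldl (fun m w => max m (pvCov top w)) a = a ∨
      ∃ w ∈ l, pvCov top w = l.foldl (fun m w => max m (pvCov top w)) a := by
  rw [pv_mfold_eq]
  have : ∀ (ll : List Int) (a : Int), ll.foldl max a = a ∨ ll.foldl max a ∈ ll := by
    intro ll
    induction ll with
    | nil => intro a; left; rfl
    | cons x t ih =>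
        intro a
        simp only [List.foldl_cons]
        rcases ih (max a x) with h | h
        · rcases max_choice a x with hm | hm
          · left; rw [h, hm]
          · right; rw [h, hm]; simp
        · right; simp [h]
  rcases this (l.map (pvCov top)) a with h | h
  · exact Or.inl h
  · rcases List.mem_map.mp h with ⟨w, hw, hww⟩
    exact Or.inr ⟨w, hw, hww⟩

lemma pv_Bfold (top : List String) :
    ∀ (l : List String) (acc : Option (String × Int)),
    l.foldl (pvB_step top) acc =
      (if l.foldl (fun m w => max m (pvCov top w)) (pvAccVal acc) = pvAccVal acc then acc
       else (l.find? (fun w =>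
          decide (l.foldl (fun m w => max m (pvCov top w)) (pvAccVal acc) ≤ pvCov top w))).map
          (fun w => (w, l.foldl (fun m w => max m (pvCov top w)) (pvAccVal acc)))) := by
  intro l
  induction l with
  | nil => intro acc; simp
  | cons w t ih =>
      intro acc
      simp only [List.foldl_cons]
      have hstep : pvB_step top acc w =
          if pvAccVal acc < pvCov top w then some (w, pvCov top w) else acc := rfl
      have hval : pvAccVal (pvB_step top acc w) = max (pvAccVal acc) (pvCov top w) := by
        rw [hstep]
        by_cases h : pvAccVal acc < pvCov top w
        · rw [if_pos h]
          show pvCov top w = _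
          omega
        · rw [if_neg h]
          show pvAccVal acc = _
          omega
      rw [ih (pvB_step top acc w), hval]
      have hmge : max (pvAccVal acc) (pvCov top w) ≤
          t.foldl (fun m w => max m (pvCov top w)) (max (pvAccVal acc) (pvCov top w)) :=
        pv_le_mfold top t _
      by_cases hac : pvAccVal acc < pvCov top w
      · rw [hstep, if_pos hac, if_neg (by omega :
          ¬ t.foldl (fun m w => max m (pvCov top w)) (max (pvAccVal acc) (pvCov top w)) = pvAccVal acc)]
        by_cases hmc : t.foldl (fun m w => max m (pvCov top w)) (max (pvAccVal acc) (pvCov top w))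
            = pvCov top w
        · rw [if_pos (by omega :
            t.foldl (fun m w => max m (pvCov top w)) (max (pvAccVal acc) (pvCov top w))
              = max (pvAccVal acc) (pvCov top w))]
          rw [List.find?_cons_of_pos (by simp only [decide_eq_true_eq]; omega)]
          simp [hmc]
        · rw [if_neg (by omega :
            ¬ t.foldl (fun m w => max m (pvCov top w)) (max (pvAccVal acc) (pvCov top w))
              = max (pvAccVal acc) (pvCov top w))]
          rw [List.find?_cons_of_neg (by simp only [decide_eq_true_eq]; omega)]
          rfl
      · simp only [hstep, if_neg hac, max_eq_left (not_lt.mp hac)]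
        have hmge' : pvAccVal acc ≤ t.foldl (fun m w => max m (pvCov top w)) (pvAccVal acc) :=
          pv_le_mfold top t _
        by_cases hma : t.foldl (fun m w => max m (pvCov top w)) (pvAccVal acc) = pvAccVal acc
        · rw [if_pos hma, if_pos hma]
        · rw [if_neg hma, if_neg hma]
          rw [List.find?_cons_of_neg (by simp only [decide_eq_true_eq]; omega)]

lemma pv_B_eq_mid (wl : List String) :
    get_next_word_bi_gram_alt wl = pvMid wl (pvB_top wl) := by
  show wl.foldl (pvB_step (pvB_top wl)) none = _
  rw [pv_Bfold (pvB_top wl) wl none]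
  unfold pvMid pvM pvAccVal
  rcases pv_mfold_attained (pvB_top wl) wl 0 with h | h
  · simp [h]
  · rfl

-- T lemmas
lemma pv_T_nodup (wl : List String) : (pvB_top wl).Nodup := by
  have hk := pv_keys_nodup wl
  set counts := wl.foldl (fun d word =>
    (PySem.List.pyRange 0 4).foldl (fun d i =>
      let bg := PySem.Str.slice word (some i) (some (i + 2))
      d.insert bg (d.getD bg 0 + 1)) d) (PySem.Dict.empty (κ := String) (ν := Int)) with hc
  have hitems : (counts.items.map (fun p => p.1)).Nodup := hk
  have hperm : (PySem.List.sorted counts.items (fun x => x.2) true).Perm counts.items :=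
    PySem.List.sorted_perm _ _ _
  have hs : ((PySem.List.sorted counts.items (fun x => x.2) true).map (fun p => p.1)).Nodup :=
    (hperm.map (fun p => p.1)).symm.nodup hitems
  show ((PySem.List.slice (PySem.List.sorted counts.items (fun x => x.2) true)
    none (some 5)).map (fun p => p.1)).Nodup
  rw [PySem.List.slice_to _ (by norm_num), List.map_take]
  exact hs.sublist (List.take_sublist _ _)

lemma pv_T_len (wl : List String) : ((pvB_top wl).length : Int) ≤ 5 := by
  set counts := wl.foldl (fun d word =>
    (PySem.List.pyRange 0 4).foldl (fun d i =>
      let bg := PySem.Str.slice word (some i) (some (i + 2))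
      d.insert bg (d.getD bg 0 + 1)) d) (PySem.Dict.empty (κ := String) (ν := Int)) with hc
  have : (pvB_top wl).length = ((PySem.List.slice (PySem.List.sorted counts.items
      (fun x => x.2) true) none (some 5)).map (fun p => p.1)).length := rfl
  rw [this, PySem.List.slice_to _ (by norm_num)]
  simp only [List.length_map, List.length_take]
  have := Nat.min_le_left ((5:Int).toNat)
    (PySem.List.sorted counts.items (fun x : (String × Int) => x.2) true).length
  omega

lemma pv_cov_le (top : List String) (w : String) : pvCov top w ≤ (top.length : Int) := by
  unfold pvCov
  rw [pv_cov_eq]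
  exact_mod_cast (List.takeWhile_sublist _).length_le

lemma pv_M_nonneg (wl top : List String) : 0 ≤ pvM wl top := pv_le_mfold top wl 0

lemma pv_M_le (wl top : List String) : pvM wl top ≤ (top.length : Int) := by
  unfold pvM
  rw [pv_mfold_eq]
  exact pv_foldl_max_le _ _ _ (Int.natCast_nonneg _) (fun y hy => by
    rcases List.mem_map.mp hy with ⟨w, _, rfl⟩
    exact pv_cov_le top w)

lemma pv_cnt_le (T : List String) (hnd : T.Nodup) (j : Nat) (w : String) :
    pvCnt (T.take j) w ≤ (j : Int) := by
  rw [pv_cnt_eq _ ((List.take_sublist j T).nodup hnd)]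
  exact_mod_cast pv_filter_take_le T _ j

lemma pv_cnt_cov (T : List String) (hnd : T.Nodup) (j : Nat) (w : String) :
    pvCnt (T.take j) w = (j : Int) ↔ (j : Int) ≤ pvCov T w := by
  rw [pv_cnt_eq _ ((List.take_sublist j T).nodup hnd)]
  unfold pvCov
  rw [pv_cov_eq]
  constructor
  · intro h
    exact_mod_cast (pv_filter_take_iff T _ j).mp (by exact_mod_cast h)
  · intro h
    exact_mod_cast (pv_filter_take_iff T _ j).mpr (by exact_mod_cast h)

lemma pv_desc_zero : pvDesc 0 = [] := by decide

lemma pv_desc_succ (n : Nat) : pvDesc (n + 1) = (n : Int) :: pvDesc n := by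
  unfold pvDesc
  rw [show ((n + 1 : Nat) : Int) = (n : Int) + 1 from by push_cast; ring]
  rw [PySem.List.pyRange_one_succ_right (by exact_mod_cast Nat.zero_le n)]
  simp

lemma pv_rank_head (T' : List String) (x : String) (t : List String) :
    (pvA_ranking (x :: t) T').head? =
      some (t.foldl (fun m y => if pvCnt T' m < pvCnt T' y then y else m) x,
            pvCnt T' (t.foldl (fun m y => if pvCnt T' m < pvCnt T' y then y else m) x)) := by
  show (PySem.List.sorted ((x :: t).map (fun w => (w, pvCnt T' w))) (fun p => p.2) true).head? = _
  rw [List.map_cons, pv_sorted_head (fun p : String × Int => p.2), List.foldl_map]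
  exact congrArg some (pv_pair_fold (fun w => pvCnt T' w) t x)

lemma pv_Aloop (T : List String) (hnd : T.Nodup) (x : String) (t : List String) :
    ∀ n : Nat, pvM (x :: t) T ≤ (n : Int) → pvA_loop (x :: t) T (pvDesc n) = pvMid (x :: t) T := by
  intro n
  induction n with
  | zero =>
      intro hM
      rw [pv_desc_zero]
      have h0 : pvM (x :: t) T = 0 := le_antisymm (by exact_mod_cast hM) (pv_M_nonneg _ _)
      show none = pvMid (x :: t) T
      rw [pvMid, if_pos h0]
  | succ n ih =>
      intro hM
      rw [pv_desc_succ]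
      have hsl : PySem.List.slice T none (some ((n : Int) + 1)) = T.take (n + 1) := by
        rw [PySem.List.slice_to T (by omega)]
        norm_num
      have hrh := pv_rank_head (T.take (n + 1)) x t
      set fm := t.foldl (fun m y => if pvCnt (T.take (n + 1)) m < pvCnt (T.take (n + 1)) y then y else m) x with hfm
      have hps := pv_pick_spec (fun w => pvCnt (T.take (n + 1)) w) t x
      have hfmem : fm ∈ x :: t := List.mem_of_find?_eq_some hps.2
      show (match (pvA_ranking (x :: t) (PySem.List.slice T none (some ((n:Int) + 1)))).head? with
        | none => (none : Option (String × Int))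
        | some h => if h.2 == (n : Int) + 1 then some h else pvA_loop (x :: t) T (pvDesc n)) = _
      rw [hsl, hrh]
      show (if pvCnt (T.take (n + 1)) fm == (n : Int) + 1
        then some (fm, pvCnt (T.take (n + 1)) fm) else pvA_loop (x :: t) T (pvDesc n)) = _
      by_cases hc : pvCnt (T.take (n + 1)) fm = (n : Int) + 1
      · rw [if_pos (by simp [hc])]
        have hcov : ((n + 1 : Nat) : Int) ≤ pvCov T fm :=
          (pv_cnt_cov T hnd (n + 1) fm).mp (by exact_mod_cast hc)
        have hMj : pvM (x :: t) T = (n : Int) + 1 := by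
          have h1 : pvCov T fm ≤ pvM (x :: t) T := pv_mem_le_mfold T (x :: t) 0 fm hfmem
          push_cast at hcov
          omega
        rw [pvMid, if_neg (by omega)]
        have hfc : (x :: t).find? (fun w => decide (pvM (x :: t) T ≤ pvCov T w)) =
            (x :: t).find? (fun y => decide (pvCnt (T.take (n + 1)) fm ≤ pvCnt (T.take (n + 1)) y)) := by
          apply pv_find_congr
          intro a _
          have hle := pv_cnt_le T hnd (n + 1) a
          have hic := pv_cnt_cov T hnd (n + 1) a
          simp only [decide_eq_decide]
          rw [hMj, hc]
          push_cast at hle hic ⊢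
          constructor
          · intro h
            have h2 := hic.mpr h
            omega
          · intro h
            have h2 := hic.mp (by omega)
            omega
        rw [hfc]
        rw [hfm] at hc
        rw [hfm, hps.2, hc, hMj]
        simp
      · rw [if_neg (by simp [hc])]
        have hlt : pvM (x :: t) T < (n : Int) + 1 := by
          rcases lt_or_ge (pvM (x :: t) T) ((n : Int) + 1) with h | h
          · exact h
          · exfalso
            have hpos : pvM (x :: t) T ≠ 0 := by omega
            have hMr : pvM (x :: t) T = (x :: t).foldl (fun m w => max m (pvCov T w)) 0 := rfl
            rcases pv_mfold_attained T (x :: t) 0 with h0 | ⟨w, hw, hww⟩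
            · rw [← hMr] at h0
              exact hpos h0
            · rw [← hMr] at hww
              have hcw : ((n + 1 : Nat) : Int) ≤ pvCov T w := by push_cast; omega
              have := (pv_cnt_cov T hnd (n + 1) w).mpr hcw
              have hwle := hps.1 w hw
              rw [← hfm] at hwle
              have hfle := pv_cnt_le T hnd (n + 1) fm
              push_cast at this
              exact hc (by omega)
        exact ih (by omega)

lemma pv_A_eq_mid (wl : List String) (h : wl ≠ []) :
    get_next_word_bi_gram wl = pvMid wl (pvB_top wl) := by
  obtain ⟨x, t, rfl⟩ := List.exists_cons_of_ne_nil h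
  show pvA_loop (x :: t) (pvA_bi_gram_cnt (x :: t)) ((PySem.List.pyRange 0 5).reverse) = _
  rw [pv_top_eq]
  rw [show (PySem.List.pyRange 0 5).reverse = pvDesc 5 from by norm_num [pvDesc]]
  exact pv_Aloop (pvB_top (x :: t)) (pv_T_nodup _) x t 5
    (le_trans (pv_M_le _ _) (by exact_mod_cast pv_T_len _))

-- ===== VERDICT (by name: the statement is the Claim_ definition above) =====
theorem get_next_word_bi_gram_spec : Claim_equal_get_next_word_bi_gram := by
  intro wl _ hpre
  unfold Spec_get_next_word_bi_gram
  exact (pv_A_eq_mid wl hpre).trans (pv_B_eq_mid wl).symm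

theorem get_next_word_bi_gram_raises : Claim_raises_get_next_word_bi_gram := by
  unfold Claim_raises_get_next_word_bi_gram
  exact ⟨by
    intro wl _ hr
    rw [Raises_get_next_word_bi_gram] at hr
    rw [Pre_get_next_word_bi_gram, hr]
    simp, by decide⟩

-- witness self-check: the crash-fix witness value, read off the proved claim
theorem pv_raise_witness_ok :
    get_next_word_bi_gram_alt pvRaiseWitness_get_next_word_bi_gram =
      pvRaiseWitnessOut_get_next_word_bi_gram := by
  have h := get_next_word_bi_gram_raises
  unfold Claim_raises_get_next_word_bi_gram at h
  exact h.2.2.2
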